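-- pv_equiv track=rewrite | github.com/justinstimatze/effigy | effigy/parser.py | _parse_lines_block
-- ===== SOURCE A (Python) =====
-- def _split_items(content: str) -> list[str]:
--     """Split block content by --- separator lines."""
--     items: list[str] = []
--     current_lines: list[str] = []
--     for line in content.split("\n"):
--         stripped = line.strip()
--         if stripped == "---":
--             if current_lines:
--                 items.append("\n".join(current_lines))
--                 current_lines = []
--         elif stripped and not stripped.startswith("#"):
--             current_lines.append(line)
--     if current_lines:
--         items.append("\n".join(current_lines))
--     return items
--
-- def _parse_lines_block(content: str) -> list[str]:
--     """Parse ARRIVE[...] or DEPART[...] — line list separated by ---."""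
--     items = _split_items(content)
--     result = []
--     for item in items:
--         # Each item may have multiple lines — join them
--         lines = [l.strip() for l in item.strip().split("\n") if l.strip()]
--         text = " ".join(lines) if lines else ""
--         if text:
--             result.append(text)
--     return result
-- ===== SOURCE B (Python) =====
-- def _parse_lines_block(content: str) -> list[str]:
--     """Parse ARRIVE[...] or DEPART[...] — line list separated by ---."""
--     stripped = [l.strip() for l in content.split("\n")]
--     n = len(stripped)
--     result = []
--     i = 0
--     while i < n:
--         j = i
--         while j < n and stripped[j] != "---":
--             j += 1
--         words = [s for s in stripped[i:j] if s and not s.startswith("#")]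
--         if words:
--             result.append(" ".join(words))
--         i = j + 1
--     return result
-- ===== Notes on version B (the rewrite author's own statement) =====
-- stated objective: simpler
-- what changed: B strips all lines once up front and then walks the stripped list by separator-delimited segments (scan to the next '---', filter the segment, join with spaces), replacing A's two-pass scheme of building newline-joined item strings and then re-splitting, re-stripping and re-joining each of them.
import Mathlib
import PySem

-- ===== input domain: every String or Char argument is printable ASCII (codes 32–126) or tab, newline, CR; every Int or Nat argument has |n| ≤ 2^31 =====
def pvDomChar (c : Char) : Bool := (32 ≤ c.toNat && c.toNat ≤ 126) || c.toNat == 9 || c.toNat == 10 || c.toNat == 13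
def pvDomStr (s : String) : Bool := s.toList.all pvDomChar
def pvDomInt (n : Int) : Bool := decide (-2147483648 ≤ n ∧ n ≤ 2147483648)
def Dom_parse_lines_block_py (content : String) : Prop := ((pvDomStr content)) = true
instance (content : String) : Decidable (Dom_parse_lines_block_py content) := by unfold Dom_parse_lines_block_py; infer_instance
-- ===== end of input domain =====

-- B strips all lines once, then walks the stripped list segment by segment ('---' delimited),
-- filtering and space-joining each segment, instead of A's two passes with '\n'-joined
-- intermediate item strings that get re-split/re-stripped/re-joined (objective: simpler).

-- ===== PORT A =====
-- port of _split_items (helper of A), line for line, over List Char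
def pvSplitItems (content : List Char) : List (List Char) :=
  let st := (PySem.Chars.splitOn content ['\n']).foldl
    (fun (st : List (List Char) × List (List Char)) (line : List Char) =>
      let stripped := PySem.Chars.strip line
      if stripped = ['-', '-', '-'] then
        (if st.2 ≠ [] then (st.1 ++ [PySem.Chars.join ['\n'] st.2], ([] : List (List Char))) else st)
      else if stripped ≠ [] ∧ PySem.Chars.startswith stripped ['#'] = false then
        (st.1, st.2 ++ [line])
      else st)
    ([], [])
  if st.2 ≠ [] then st.1 ++ [PySem.Chars.join ['\n'] st.2] else st.1

def parse_lines_block_py (content : String) : List String :=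
  let items := pvSplitItems content.toList
  (items.foldl
    (fun (result : List (List Char)) (item : List Char) =>
      let lines := (PySem.Chars.splitOn (PySem.Chars.strip item) ['\n']).filterMap
        (fun l => if PySem.Chars.strip l ≠ [] then some (PySem.Chars.strip l) else none)
      let text := if lines ≠ [] then PySem.Chars.join [' '] lines else []
      if text ≠ [] then result ++ [text] else result)
    []).map String.ofList

-- ===== PORT B =====
-- outer while loop: one recursive step per '---'-delimited segment of the stripped lines;
-- the inner scan to the next separator is the takeWhile/dropWhile split, the comprehension the filter
def pvAltLoop : List (List Char) → List (List Char)
  | [] => []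
  | s :: r =>
    let seg := ((s :: r).takeWhile (fun t => !(t == ['-', '-', '-']))).filter
        (fun t => !(t == ([] : List Char)) && !(PySem.Chars.startswith t ['#']))
    let rest := (s :: r).dropWhile (fun t => !(t == ['-', '-', '-']))
    (if seg ≠ [] then [PySem.Chars.join [' '] seg] else []) ++ pvAltLoop rest.tail
termination_by ls => ls.length
decreasing_by
  have h1 := List.length_dropWhile_le (fun t => !(t == ['-', '-', '-'])) (s :: r)
  simp only [List.length_tail, List.length_cons] at *
  omega

def parse_lines_block_py_alt (content : String) : List String :=
  (pvAltLoop ((PySem.Chars.splitOn content.toList ['\n']).map PySem.Chars.strip)).map String.ofList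

-- ===== PRECONDITION & SPEC =====
def Spec_parse_lines_block_py (content : String) (out : List String) : Prop := out = parse_lines_block_py_alt content
instance (content : String) (out : List String) : Decidable (Spec_parse_lines_block_py content out) := by unfold Spec_parse_lines_block_py; infer_instance

-- ===== CLAIM (what is proved, stated in full; the proofs are below) =====
def Claim_equal_parse_lines_block_py : Prop := ∀ (content : String), Dom_parse_lines_block_py content → Spec_parse_lines_block_py content (parse_lines_block_py content)

-- ===== LEMMAS AND PROOFS =====

-- splitOn with a single-character separator is List.splitOn
theorem pv_splitOn_go (c : Char) (fuel : Nat) :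
    ∀ (l cur : List Char) (acc : List (List Char)), l.length < fuel →
    PySem.Chars.splitOn.go [c] fuel l cur acc
      = acc.reverse ++ (l.splitOnP (· == c)).modifyHead (cur.reverse ++ ·) := by
  induction fuel with
  | zero => intro l cur acc h; omega
  | succ f ih =>
    intro l cur acc h
    cases l with
    | nil => simp [PySem.Chars.splitOn.go, List.splitOnP_nil]
    | cons ch rest =>
      rw [PySem.Chars.splitOn.go]
      by_cases hc : ch = c
      · subst hc
        rw [if_pos (by simp [List.isPrefixOf])]
        have hdrop : List.drop [ch].length (ch :: rest) = rest := by simp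
        rw [hdrop, ih rest [] (cur.reverse :: acc) (by simp only [List.length_cons] at h; omega)]
        rw [List.splitOnP_cons]
        cases hsp : rest.splitOnP (· == ch) with
        | nil => exact absurd hsp (List.splitOnP_ne_nil _ _)
        | cons hd tl => simp [List.modifyHead]
      · have hb : (c == ch) = false := by
          simp only [beq_eq_false_iff_ne, Ne]
          exact fun h' => hc h'.symm
        rw [if_neg (by simp [List.isPrefixOf, hb])]
        rw [ih rest (ch :: cur) acc (by simp only [List.length_cons] at h; omega)]
        rw [List.splitOnP_cons]
        have hb2 : (ch == c) = false := by simpa [beq_eq_false_iff_ne, Ne] using hc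
        cases hsp : rest.splitOnP (· == c) with
        | nil => exact absurd hsp (List.splitOnP_ne_nil _ _)
        | cons hd tl => simp [hb2, List.modifyHead]

theorem pv_splitOn_single (s : List Char) (c : Char) :
    PySem.Chars.splitOn s [c] = s.splitOn c := by
  unfold PySem.Chars.splitOn
  rw [pv_splitOn_go c (s.length + 1) s [] [] (by omega)]
  cases hsp : s.splitOnP (· == c) with
  | nil => exact absurd hsp (List.splitOnP_ne_nil _ _)
  | cons hd tl => simp [List.splitOn, hsp, List.modifyHead]

-- elements of splitOn do not contain the separator
theorem pv_not_mem_splitOnP (p : Char → Bool) :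
    ∀ (xs : List Char) (l : List Char), l ∈ xs.splitOnP p → ∀ a ∈ l, p a = false := by
  intro xs
  induction xs with
  | nil => intro l hl a ha; rw [List.splitOnP_nil] at hl; simp at hl; subst hl; simp at ha
  | cons x t ih =>
    intro l hl a ha
    rw [List.splitOnP_cons] at hl
    by_cases hp : p x = true
    · rw [if_pos hp] at hl
      rcases List.mem_cons.mp hl with h | h
      · subst h; simp at ha
      · exact ih l h a ha
    · rw [if_neg hp] at hl
      cases hsp : t.splitOnP p with
      | nil => exact absurd hsp (List.splitOnP_ne_nil _ _)
      | cons hd tl =>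
        rw [hsp] at hl; simp [List.modifyHead] at hl
        rcases hl with h | h
        · subst h
          rcases List.mem_cons.mp ha with h' | h'
          · subst h'; simpa using hp
          · exact ih hd (by rw [hsp]; exact List.mem_cons_self) a h'
        · exact ih l (by rw [hsp]; exact List.mem_cons_of_mem _ h) a ha

theorem pv_not_mem_splitOn (xs : List Char) (c : Char) (l : List Char)
    (hl : l ∈ xs.splitOn c) : c ∉ l := by
  intro hc
  have := pv_not_mem_splitOnP (· == c) xs l hl c hc
  simp at this

-- dropWhile facts
theorem pv_dropWhile_idem (p : Char → Bool) (l : List Char) :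
    List.dropWhile p (List.dropWhile p l) = List.dropWhile p l := by
  induction l with
  | nil => rfl
  | cons a t ih =>
    rw [List.dropWhile_cons]
    split_ifs with hp
    · exact ih
    · rw [List.dropWhile_cons, if_neg hp]

theorem pv_dropWhile_head (p : Char → Bool) :
    ∀ (l : List Char) (a : Char) (t : List Char), List.dropWhile p l = a :: t → p a = false := by
  intro l
  induction l with
  | nil => intro a t h; simp at h
  | cons x xs ih =>
    intro a t h
    rw [List.dropWhile_cons] at h
    split_ifs at h with hp
    · exact ih a t h
    · cases h; simpa using hp

-- lstrip / rstrip basic facts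
theorem pv_lstrip_append (xs ys : List Char) (h : PySem.Chars.lstrip xs ≠ []) :
    PySem.Chars.lstrip (xs ++ ys) = PySem.Chars.lstrip xs ++ ys := by
  show List.dropWhile PySem.Chars.isspace (xs ++ ys) = List.dropWhile PySem.Chars.isspace xs ++ ys
  rw [List.dropWhile_append,
    if_neg (fun hI : (List.dropWhile PySem.Chars.isspace xs).isEmpty = true => h (List.isEmpty_iff.mp hI))]

theorem pv_rstrip_append (xs ys : List Char) (h : PySem.Chars.rstrip ys ≠ []) :
    PySem.Chars.rstrip (xs ++ ys) = xs ++ PySem.Chars.rstrip ys := by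
  have hne : List.dropWhile PySem.Chars.isspace ys.reverse ≠ [] := by
    intro h'
    apply h
    show (List.dropWhile PySem.Chars.isspace ys.reverse).reverse = []
    rw [h']; rfl
  show (List.dropWhile PySem.Chars.isspace (xs ++ ys).reverse).reverse = xs ++ PySem.Chars.rstrip ys
  rw [List.reverse_append, List.dropWhile_append,
    if_neg (fun hI => hne (List.isEmpty_iff.mp hI))]
  simp [PySem.Chars.rstrip]

theorem pv_lstrip_eq_nil_iff (l : List Char) :
    PySem.Chars.lstrip l = [] ↔ ∀ x ∈ l, PySem.Chars.isspace x = true := by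
  simp [PySem.Chars.lstrip, PySem.Chars.lstrip, List.dropWhile_eq_nil_iff]

theorem pv_rstrip_eq_nil_iff (l : List Char) :
    PySem.Chars.rstrip l = [] ↔ ∀ x ∈ l, PySem.Chars.isspace x = true := by
  simp [PySem.Chars.rstrip, PySem.Chars.rstrip, List.dropWhile_eq_nil_iff]

theorem pv_mem_lstrip (l : List Char) (x : Char) (h : x ∈ PySem.Chars.lstrip l) : x ∈ l :=
  (List.dropWhile_sublist _).subset h

theorem pv_mem_rstrip (l : List Char) (x : Char) (h : x ∈ PySem.Chars.rstrip l) : x ∈ l := by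
  simp only [PySem.Chars.rstrip, PySem.Chars.rstrip, List.mem_reverse] at h
  simpa using (List.dropWhile_sublist _).subset h

theorem pv_strip_eq_nil_iff (l : List Char) :
    PySem.Chars.strip l = [] ↔ ∀ x ∈ l, PySem.Chars.isspace x = true := by
  constructor
  · intro h
    by_contra hall
    obtain ⟨x, hx, hnx⟩ : ∃ x ∈ l, ¬ PySem.Chars.isspace x = true := by
      by_contra hno
      exact hall (fun x hx => by by_contra hxx; exact hno ⟨x, hx, hxx⟩)
    have h1 : PySem.Chars.lstrip l ≠ [] := by
      rw [Ne, pv_lstrip_eq_nil_iff]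
      intro hA
      exact hnx (hA x hx)
    obtain ⟨a, t, hat⟩ : ∃ a t, PySem.Chars.lstrip l = a :: t := by
      cases hl : PySem.Chars.lstrip l with
      | nil => exact absurd hl h1
      | cons a t => exact ⟨a, t, rfl⟩
    have hna : PySem.Chars.isspace a = false := pv_dropWhile_head PySem.Chars.isspace l a t hat
    have h2 : PySem.Chars.rstrip (a :: t) = [] := by rw [← hat]; exact h
    rw [pv_rstrip_eq_nil_iff] at h2
    have := h2 a (by simp)
    rw [hna] at this
    exact Bool.false_ne_true this
  · intro h
    show PySem.Chars.rstrip (PySem.Chars.lstrip l) = []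
    rw [pv_rstrip_eq_nil_iff]
    intro x hx
    exact h x (pv_mem_lstrip l x hx)

theorem pv_lstrip_idem (l : List Char) : PySem.Chars.lstrip (PySem.Chars.lstrip l) = PySem.Chars.lstrip l :=
  pv_dropWhile_idem PySem.Chars.isspace l

theorem pv_rstrip_idem (l : List Char) : PySem.Chars.rstrip (PySem.Chars.rstrip l) = PySem.Chars.rstrip l := by
  show (List.dropWhile PySem.Chars.isspace ((List.dropWhile PySem.Chars.isspace l.reverse).reverse).reverse).reverse = _
  rw [List.reverse_reverse, pv_dropWhile_idem]
  rfl

theorem pv_strip_lstrip (l : List Char) : PySem.Chars.strip (PySem.Chars.lstrip l) = PySem.Chars.strip l := by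
  show PySem.Chars.rstrip (PySem.Chars.lstrip (PySem.Chars.lstrip l)) = PySem.Chars.rstrip (PySem.Chars.lstrip l)
  rw [pv_lstrip_idem]

theorem pv_rstrip_cons (a : Char) (t : List Char) :
    PySem.Chars.rstrip (a :: t) = if PySem.Chars.isspace a = true ∧ PySem.Chars.rstrip t = [] then [] else a :: PySem.Chars.rstrip t := by
  show (List.dropWhile PySem.Chars.isspace (a :: t).reverse).reverse = _
  rw [List.reverse_cons, List.dropWhile_append]
  by_cases he : List.dropWhile PySem.Chars.isspace t.reverse = []
  · rw [if_pos (by simp [he])]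
    have hrt : PySem.Chars.rstrip t = [] := by
      show (List.dropWhile PySem.Chars.isspace t.reverse).reverse = []
      rw [he]; rfl
    by_cases hs : PySem.Chars.isspace a = true
    · rw [if_pos ⟨hs, hrt⟩]
      simp [hs]
    · rw [if_neg (fun hh => hs hh.1), hrt]
      simp [hs]
  · rw [if_neg (fun hI => he (List.isEmpty_iff.mp hI))]
    have hrt : PySem.Chars.rstrip t ≠ [] := by
      show (List.dropWhile PySem.Chars.isspace t.reverse).reverse ≠ []
      simpa using he
    rw [if_neg (fun hh => hrt hh.2)]
    rw [List.reverse_append]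
    simp [PySem.Chars.rstrip]

theorem pv_lstrip_cons (a : Char) (t : List Char) :
    PySem.Chars.lstrip (a :: t) = if PySem.Chars.isspace a = true then PySem.Chars.lstrip t else a :: t := by
  show List.dropWhile PySem.Chars.isspace (a :: t) = _
  rw [List.dropWhile_cons]
  split_ifs with hs <;> rfl

theorem pv_lstrip_rstrip_comm (l : List Char) : PySem.Chars.lstrip (PySem.Chars.rstrip l) = PySem.Chars.rstrip (PySem.Chars.lstrip l) := by
  induction l with
  | nil => rfl
  | cons a t ih =>
    rw [pv_rstrip_cons, pv_lstrip_cons]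
    by_cases hs : PySem.Chars.isspace a = true
    · by_cases hr : PySem.Chars.rstrip t = []
      · rw [if_pos ⟨hs, hr⟩, if_pos hs, ← ih, hr]
      · rw [if_neg (fun hh => hr hh.2), if_pos hs, pv_lstrip_cons, if_pos hs, ih]
    · rw [if_neg (fun hh => hs hh.1), if_neg hs, pv_lstrip_cons, if_neg hs, pv_rstrip_cons,
        if_neg (fun hh => hs hh.1)]

theorem pv_strip_rstrip (l : List Char) : PySem.Chars.strip (PySem.Chars.rstrip l) = PySem.Chars.strip l := by
  show PySem.Chars.rstrip (PySem.Chars.lstrip (PySem.Chars.rstrip l)) = PySem.Chars.rstrip (PySem.Chars.lstrip l)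
  rw [pv_lstrip_rstrip_comm, pv_rstrip_idem]

theorem pv_strip_idem (l : List Char) : PySem.Chars.strip (PySem.Chars.strip l) = PySem.Chars.strip l := by
  show PySem.Chars.strip (PySem.Chars.rstrip (PySem.Chars.lstrip l)) = _
  rw [pv_strip_rstrip, pv_strip_lstrip]

-- map-last helper
def pvMapLast (f : List Char → List Char) : List (List Char) → List (List Char)
  | [] => []
  | [a] => [f a]
  | a :: b :: t => a :: pvMapLast f (b :: t)

theorem pv_mem_mapLast (f : List Char → List Char) :
    ∀ (xs : List (List Char)) (l : List Char), l ∈ pvMapLast f xs → l ∈ xs ∨ ∃ a ∈ xs, l = f a := by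
  intro xs
  induction xs with
  | nil => intro l h; simp [pvMapLast] at h
  | cons a t ih =>
    intro l h
    cases t with
    | nil =>
      simp [pvMapLast] at h
      exact Or.inr ⟨a, by simp, h⟩
    | cons b t' =>
      simp only [pvMapLast, List.mem_cons] at h
      rcases h with h | h
      · exact Or.inl (by simp [h])
      · rcases ih l h with h' | ⟨x, hx, hfx⟩
        · exact Or.inl (List.mem_cons_of_mem _ h')
        · exact Or.inr ⟨x, List.mem_cons_of_mem _ hx, hfx⟩

theorem pv_map_strip_mapLast_rstrip :
    ∀ (xs : List (List Char)), (pvMapLast PySem.Chars.rstrip xs).map PySem.Chars.strip = xs.map PySem.Chars.strip := by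
  intro xs
  induction xs with
  | nil => simp [pvMapLast]
  | cons a t ih =>
    cases t with
    | nil => simp [pvMapLast, pv_strip_rstrip]
    | cons b t' => simp only [pvMapLast, List.map_cons] at *; rw [ih]

-- intercalate unfolding helpers
theorem pv_intercalate_singleton (sep : List Char) (a : List Char) :
    sep.intercalate [a] = a := by
  simp [List.intercalate, List.intersperse]

theorem pv_intercalate_cons_cons (sep : List Char) (a b : List Char) (t : List (List Char)) :
    sep.intercalate (a :: b :: t) = a ++ sep ++ sep.intercalate (b :: t) := by
  simp [List.intercalate, List.intersperse]

theorem pv_intercalate_cons (sep : List Char) (a : List Char) (ts : List (List Char)) (h : ts ≠ []) :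
    sep.intercalate (a :: ts) = a ++ sep ++ sep.intercalate ts := by
  cases ts with
  | nil => exact absurd rfl h
  | cons b t => exact pv_intercalate_cons_cons sep a b t

-- rstrip over an intercalation whose chunks all have nonempty strip
theorem pv_rstrip_intercalate :
    ∀ (cs : List (List Char)) (c0 : List Char), (∀ l ∈ c0 :: cs, PySem.Chars.strip l ≠ []) →
    PySem.Chars.rstrip (List.intercalate ['\n'] (c0 :: cs)) = List.intercalate ['\n'] (pvMapLast PySem.Chars.rstrip (c0 :: cs))
      ∧ PySem.Chars.rstrip (List.intercalate ['\n'] (c0 :: cs)) ≠ [] := by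
  intro cs
  induction cs with
  | nil =>
    intro c0 h
    rw [show pvMapLast PySem.Chars.rstrip [c0] = [PySem.Chars.rstrip c0] from rfl,
      pv_intercalate_singleton, pv_intercalate_singleton]
    refine ⟨rfl, ?_⟩
    intro hr
    exact h c0 (by simp) ((pv_strip_eq_nil_iff c0).mpr ((pv_rstrip_eq_nil_iff c0).mp hr))
  | cons c1 t ih =>
    intro c0 h
    have h' : ∀ l ∈ c1 :: t, PySem.Chars.strip l ≠ [] := fun l hl => h l (List.mem_cons_of_mem _ hl)
    obtain ⟨ihe, ihn⟩ := ih c1 h'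
    rw [pv_intercalate_cons_cons]
    have htail : PySem.Chars.rstrip ('\n' :: List.intercalate ['\n'] (c1 :: t))
        = '\n' :: PySem.Chars.rstrip (List.intercalate ['\n'] (c1 :: t)) := by
      rw [pv_rstrip_cons, if_neg (fun hh => ihn hh.2)]
    have key : PySem.Chars.rstrip (c0 ++ ['\n'] ++ List.intercalate ['\n'] (c1 :: t))
        = c0 ++ ['\n'] ++ PySem.Chars.rstrip (List.intercalate ['\n'] (c1 :: t)) := by
      rw [List.append_assoc]
      rw [show (['\n'] ++ List.intercalate ['\n'] (c1 :: t) : List Char)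
          = '\n' :: List.intercalate ['\n'] (c1 :: t) from rfl]
      rw [pv_rstrip_append _ _ (by rw [htail]; simp), htail]
      simp
    have hmlne : pvMapLast PySem.Chars.rstrip (c1 :: t) ≠ [] := by cases t <;> simp [pvMapLast]
    constructor
    · rw [key, ihe,
        show pvMapLast PySem.Chars.rstrip (c0 :: c1 :: t) = c0 :: pvMapLast PySem.Chars.rstrip (c1 :: t) from rfl,
        pv_intercalate_cons _ _ _ hmlne]
    · rw [key]; simp

theorem pv_lstrip_intercalate (c0 : List Char) (cs : List (List Char)) (h : PySem.Chars.lstrip c0 ≠ []) :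
    PySem.Chars.lstrip (List.intercalate ['\n'] (c0 :: cs)) = List.intercalate ['\n'] (PySem.Chars.lstrip c0 :: cs) := by
  cases cs with
  | nil => rw [pv_intercalate_singleton, pv_intercalate_singleton]
  | cons c1 t =>
    rw [pv_intercalate_cons_cons, pv_intercalate_cons_cons, List.append_assoc,
      pv_lstrip_append _ _ h, List.append_assoc]

-- filterMap over a list of all-nonempty-strip chunks is map strip
theorem pv_filterMap_strip (xs : List (List Char)) (h : ∀ l ∈ xs, PySem.Chars.strip l ≠ []) :
    xs.filterMap (fun l => if PySem.Chars.strip l ≠ [] then some (PySem.Chars.strip l) else none)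
      = xs.map PySem.Chars.strip := by
  induction xs with
  | nil => simp
  | cons a t ih =>
    rw [List.filterMap_cons, if_pos (h a List.mem_cons_self)]
    rw [List.map_cons, ih (fun l hl => h l (List.mem_cons_of_mem _ hl))]

-- per-item text: defined exactly as A's second pass computes it
def pvItemText (item : List Char) : List Char :=
  let lines := (PySem.Chars.splitOn (PySem.Chars.strip item) ['\n']).filterMap
    (fun l => if PySem.Chars.strip l ≠ [] then some (PySem.Chars.strip l) else none)
  if lines ≠ [] then PySem.Chars.join [' '] lines else []

theorem pv_join_sp_ne_nil (g : List (List Char)) (hne : g ≠ []) (h : ∀ l ∈ g, l ≠ []) :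
    PySem.Chars.join [' '] g ≠ [] := by
  cases g with
  | nil => exact absurd rfl hne
  | cons a t =>
    cases t with
    | nil =>
      rw [PySem.Chars.join, pv_intercalate_singleton]
      exact h a (by simp)
    | cons b t' =>
      rw [PySem.Chars.join, pv_intercalate_cons_cons]
      have := h a (by simp)
      cases a with
      | nil => exact absurd rfl this
      | cons x xs => simp

-- THE KEY LEMMA: A's per-item re-split/re-strip/re-join equals joining the stripped lines
theorem pv_itemText_join (cur : List (List Char)) (hne : cur ≠ [])
    (hc : ∀ l ∈ cur, ('\n' ∉ l) ∧ PySem.Chars.strip l ≠ []) :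
    pvItemText (PySem.Chars.join ['\n'] cur) = PySem.Chars.join [' '] (cur.map PySem.Chars.strip)
      ∧ pvItemText (PySem.Chars.join ['\n'] cur) ≠ [] := by
  obtain ⟨c0, cs, rfl⟩ : ∃ c0 cs, cur = c0 :: cs := by
    cases cur with
    | nil => exact absurd rfl hne
    | cons a t => exact ⟨a, t, rfl⟩
  have hstrips : ∀ l ∈ c0 :: cs, PySem.Chars.strip l ≠ [] := fun l hl => (hc l hl).2
  have hl0 : PySem.Chars.lstrip c0 ≠ [] := by
    intro h
    exact hstrips c0 (by simp) (by rw [pv_strip_eq_nil_iff]; exact (pv_lstrip_eq_nil_iff c0).mp h)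
  have hstrip_eq : PySem.Chars.strip (PySem.Chars.join ['\n'] (c0 :: cs))
      = List.intercalate ['\n'] (pvMapLast PySem.Chars.rstrip (PySem.Chars.lstrip c0 :: cs)) := by
    show PySem.Chars.rstrip (PySem.Chars.lstrip (List.intercalate ['\n'] (c0 :: cs))) = _
    rw [pv_lstrip_intercalate c0 cs hl0]
    have hstrips' : ∀ l ∈ PySem.Chars.lstrip c0 :: cs, PySem.Chars.strip l ≠ [] := by
      intro l hl
      rcases List.mem_cons.mp hl with h | h
      · subst h; rw [pv_strip_lstrip]; exact hstrips c0 (by simp)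
      · exact hstrips l (List.mem_cons_of_mem _ h)
    exact (pv_rstrip_intercalate cs (PySem.Chars.lstrip c0) hstrips').1
  have hnonl : ∀ l ∈ pvMapLast PySem.Chars.rstrip (PySem.Chars.lstrip c0 :: cs), '\n' ∉ l := by
    intro l hl
    have base : ∀ x ∈ PySem.Chars.lstrip c0 :: cs, '\n' ∉ x := by
      intro x hx
      rcases List.mem_cons.mp hx with h | h
      · subst h; intro hm; exact (hc c0 (by simp)).1 (pv_mem_lstrip _ _ hm)
      · exact (hc x (List.mem_cons_of_mem _ h)).1
    rcases pv_mem_mapLast PySem.Chars.rstrip _ l hl with h | ⟨a, ha, rfl⟩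
    · exact base l h
    · intro hm; exact base a ha (pv_mem_rstrip _ _ hm)
  have hnemp : pvMapLast PySem.Chars.rstrip (PySem.Chars.lstrip c0 :: cs) ≠ [] := by
    cases cs <;> simp [pvMapLast]
  have hsplit : PySem.Chars.splitOn (PySem.Chars.strip (PySem.Chars.join ['\n'] (c0 :: cs))) ['\n']
      = pvMapLast PySem.Chars.rstrip (PySem.Chars.lstrip c0 :: cs) := by
    rw [hstrip_eq, pv_splitOn_single]
    exact List.splitOn_intercalate _ '\n' hnonl hnemp
  have hstrips2 : ∀ l ∈ pvMapLast PySem.Chars.rstrip (PySem.Chars.lstrip c0 :: cs), PySem.Chars.strip l ≠ [] := by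
    intro l hl
    have base : ∀ x ∈ PySem.Chars.lstrip c0 :: cs, PySem.Chars.strip x ≠ [] := by
      intro x hx
      rcases List.mem_cons.mp hx with h | h
      · subst h; rw [pv_strip_lstrip]; exact hstrips c0 (by simp)
      · exact hstrips x (List.mem_cons_of_mem _ h)
    rcases pv_mem_mapLast PySem.Chars.rstrip _ l hl with h | ⟨a, ha, rfl⟩
    · exact base l h
    · rw [pv_strip_rstrip]; exact base a ha
  have hmap : (pvMapLast PySem.Chars.rstrip (PySem.Chars.lstrip c0 :: cs)).map PySem.Chars.strip = (c0 :: cs).map PySem.Chars.strip := by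
    rw [pv_map_strip_mapLast_rstrip]
    simp only [List.map_cons, pv_strip_lstrip]
  have hlines : (PySem.Chars.splitOn (PySem.Chars.strip (PySem.Chars.join ['\n'] (c0 :: cs))) ['\n']).filterMap
      (fun l => if PySem.Chars.strip l ≠ [] then some (PySem.Chars.strip l) else none)
      = (c0 :: cs).map PySem.Chars.strip := by
    rw [hsplit, pv_filterMap_strip _ hstrips2, hmap]
  have hlne : ((c0 :: cs).map PySem.Chars.strip : List (List Char)) ≠ [] := by simp
  constructor
  · unfold pvItemText
    simp only [hlines, if_pos hlne]
  · unfold pvItemText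
    simp only [hlines, if_pos hlne]
    apply pv_join_sp_ne_nil _ hlne
    intro l hl
    simp only [List.mem_map] at hl
    obtain ⟨x, hx, rfl⟩ := hl
    exact hstrips x hx

-- generic accumulator shapes for the two single-pass folds
def pvFoldG (e u : List (List Char) → List Char → List (List Char)) :
    List (List Char) → (List (List Char) × List (List Char)) → (List (List Char) × List (List Char))
  | [], st => st
  | l :: rest, st => pvFoldG e u rest (st.1 ++ e st.2 l, u st.2 l)

theorem pvFoldG_acc (e u : List (List Char) → List Char → List (List Char)) :
    ∀ (lines : List (List Char)) (items cur : List (List Char)),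
    pvFoldG e u lines (items, cur)
      = (items ++ (pvFoldG e u lines ([], cur)).1, (pvFoldG e u lines ([], cur)).2) := by
  intro lines
  induction lines with
  | nil => intro items cur; simp [pvFoldG]
  | cons l rest ih =>
    intro items cur
    show pvFoldG e u rest (items ++ e cur l, u cur l) = _
    rw [ih (items ++ e cur l) (u cur l)]
    conv_rhs => rw [show pvFoldG e u (l :: rest) ([], cur) = pvFoldG e u rest ([] ++ e cur l, u cur l) from rfl]
    rw [ih ([] ++ e cur l) (u cur l)]
    simp

-- A's emit/update functions, and a stripped-line variant used to reach B
def pvEmitA (cur : List (List Char)) (line : List Char) : List (List Char) :=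
  if PySem.Chars.strip line = ['-', '-', '-'] then
    (if cur ≠ [] then [PySem.Chars.join ['\n'] cur] else []) else []

def pvUpdA (cur : List (List Char)) (line : List Char) : List (List Char) :=
  if PySem.Chars.strip line = ['-', '-', '-'] then (if cur ≠ [] then [] else cur)
  else if PySem.Chars.strip line ≠ [] ∧ PySem.Chars.startswith (PySem.Chars.strip line) ['#'] = false then
    cur ++ [line]
  else cur

def pvEmitB (cur : List (List Char)) (line : List Char) : List (List Char) :=
  if PySem.Chars.strip line = ['-', '-', '-'] then
    (if cur ≠ [] then [PySem.Chars.join [' '] cur] else []) else []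

def pvUpdB (cur : List (List Char)) (line : List Char) : List (List Char) :=
  if PySem.Chars.strip line = ['-', '-', '-'] then (if cur ≠ [] then [] else cur)
  else if PySem.Chars.strip line ≠ [] ∧ PySem.Chars.startswith (PySem.Chars.strip line) ['#'] = false then
    cur ++ [PySem.Chars.strip line]
  else cur

-- the A port's fold is the generic fold (statement in zeta-normal form)
theorem pv_foldA_eq (lines : List (List Char)) :
    ∀ (st : List (List Char) × List (List Char)),
    lines.foldl
      (fun (st : List (List Char) × List (List Char)) (line : List Char) =>
        if PySem.Chars.strip line = ['-', '-', '-'] then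
          (if st.2 ≠ [] then (st.1 ++ [PySem.Chars.join ['\n'] st.2], ([] : List (List Char))) else st)
        else if PySem.Chars.strip line ≠ [] ∧ PySem.Chars.startswith (PySem.Chars.strip line) ['#'] = false then
          (st.1, st.2 ++ [line])
        else st) st
      = pvFoldG pvEmitA pvUpdA lines st := by
  induction lines with
  | nil => intro st; rfl
  | cons l rest ih =>
    intro st
    obtain ⟨a, b⟩ := st
    rw [List.foldl_cons, ih]
    rw [show pvFoldG pvEmitA pvUpdA (l :: rest) (a, b)
        = pvFoldG pvEmitA pvUpdA rest ((a, b).1 ++ pvEmitA (a, b).2 l, pvUpdA (a, b).2 l) from rfl]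
    congr 1
    unfold pvEmitA pvUpdA
    split_ifs <;> simp_all

def pvSecond (items : List (List Char)) : List (List Char) :=
  items.flatMap (fun item => if pvItemText item ≠ [] then [pvItemText item] else [])

-- A's second pass emits pvItemText of each item (statement in zeta-normal form)
theorem pv_second_pass (items : List (List Char)) :
    ∀ (r : List (List Char)),
    items.foldl
      (fun (result : List (List Char)) (item : List Char) =>
        if (if ((PySem.Chars.splitOn (PySem.Chars.strip item) ['\n']).filterMap
              (fun l => if PySem.Chars.strip l ≠ [] then some (PySem.Chars.strip l) else none)) ≠ []
            then PySem.Chars.join [' '] ((PySem.Chars.splitOn (PySem.Chars.strip item) ['\n']).filterMap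
              (fun l => if PySem.Chars.strip l ≠ [] then some (PySem.Chars.strip l) else none))
            else []) ≠ [] then
          result ++ [if ((PySem.Chars.splitOn (PySem.Chars.strip item) ['\n']).filterMap
              (fun l => if PySem.Chars.strip l ≠ [] then some (PySem.Chars.strip l) else none)) ≠ []
            then PySem.Chars.join [' '] ((PySem.Chars.splitOn (PySem.Chars.strip item) ['\n']).filterMap
              (fun l => if PySem.Chars.strip l ≠ [] then some (PySem.Chars.strip l) else none))
            else []]
        else result) r
      = r ++ pvSecond items := by
  induction items with
  | nil => intro r; simp [pvSecond]
  | cons a t ih =>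
    intro r
    rw [List.foldl_cons, ih]
    show (if pvItemText a ≠ [] then r ++ [pvItemText a] else r) ++ pvSecond t = r ++ pvSecond (a :: t)
    by_cases h : pvItemText a ≠ []
    · rw [if_pos h]
      simp [pvSecond, h]
    · rw [if_neg h]
      have h' : pvItemText a = [] := not_not.mp h
      simp [pvSecond, h']

def pvFinA (st : List (List Char) × List (List Char)) : List (List Char) :=
  if st.2 ≠ [] then st.1 ++ [PySem.Chars.join ['\n'] st.2] else st.1

def pvFinB (st : List (List Char) × List (List Char)) : List (List Char) :=
  if st.2 ≠ [] then st.1 ++ [PySem.Chars.join [' '] st.2] else st.1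

-- THE MAIN INVARIANT: A's two passes equal the B-style fold over the raw lines
theorem pv_core :
    ∀ (lines : List (List Char)), (∀ l ∈ lines, '\n' ∉ l) →
    ∀ (cur : List (List Char)), (∀ l ∈ cur, ('\n' ∉ l) ∧ PySem.Chars.strip l ≠ []) →
    pvSecond (pvFinA (pvFoldG pvEmitA pvUpdA lines ([], cur)))
      = pvFinB (pvFoldG pvEmitB pvUpdB lines ([], cur.map PySem.Chars.strip)) := by
  intro lines
  induction lines with
  | nil =>
    intro _ cur hc
    show pvSecond (pvFinA ([], cur)) = pvFinB ([], cur.map PySem.Chars.strip)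
    by_cases hne : cur = []
    · subst hne
      simp [pvFinA, pvFinB, pvSecond]
    · obtain ⟨heq, hnn⟩ := pv_itemText_join cur hne hc
      have h1 : pvFinA ([], cur) = [PySem.Chars.join ['\n'] cur] := by simp [pvFinA, hne]
      have h2 : pvFinB ([], cur.map PySem.Chars.strip) = [PySem.Chars.join [' '] (cur.map PySem.Chars.strip)] := by
        simp [pvFinB, hne]
      rw [h1, h2]
      have hnn' : PySem.Chars.join [' '] (cur.map PySem.Chars.strip) ≠ [] := heq ▸ hnn
      simp [pvSecond, heq, hnn']
  | cons l rest ih =>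
    intro hnl cur hc
    have hnl' : ∀ x ∈ rest, '\n' ∉ x := fun x hx => hnl x (List.mem_cons_of_mem _ hx)
    show pvSecond (pvFinA (pvFoldG pvEmitA pvUpdA rest ([] ++ pvEmitA cur l, pvUpdA cur l)))
      = pvFinB (pvFoldG pvEmitB pvUpdB rest
          ([] ++ pvEmitB (cur.map PySem.Chars.strip) l, pvUpdB (cur.map PySem.Chars.strip) l))
    by_cases hsep : PySem.Chars.strip l = ['-', '-', '-']
    · by_cases hne : cur = []
      · subst hne
        have eA : pvEmitA [] l = [] := by simp [pvEmitA, hsep]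
        have uA : pvUpdA [] l = [] := by simp [pvUpdA, hsep]
        have eB : pvEmitB (([] : List (List Char)).map PySem.Chars.strip) l = [] := by simp [pvEmitB, hsep]
        have uB : pvUpdB (([] : List (List Char)).map PySem.Chars.strip) l = [] := by simp [pvUpdB, hsep]
        rw [eA, uA, eB, uB]
        have := ih hnl' [] (by simp)
        simpa using this
      · have hmapne : cur.map PySem.Chars.strip ≠ [] := by simpa using hne
        obtain ⟨heq, hnn⟩ := pv_itemText_join cur hne hc
        have eA : pvEmitA cur l = [PySem.Chars.join ['\n'] cur] := by simp [pvEmitA, hsep, hne]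
        have uA : pvUpdA cur l = [] := by simp [pvUpdA, hsep, hne]
        have eB : pvEmitB (cur.map PySem.Chars.strip) l = [PySem.Chars.join [' '] (cur.map PySem.Chars.strip)] := by
          simp [pvEmitB, hsep, hmapne]
        have uB : pvUpdB (cur.map PySem.Chars.strip) l = [] := by simp [pvUpdB, hsep, hmapne]
        rw [eA, uA, eB, uB, List.nil_append, List.nil_append]
        rw [pvFoldG_acc pvEmitA pvUpdA rest [PySem.Chars.join ['\n'] cur] [],
          pvFoldG_acc pvEmitB pvUpdB rest [PySem.Chars.join [' '] (cur.map PySem.Chars.strip)] []]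
        have hAfst : pvFinA ([PySem.Chars.join ['\n'] cur] ++ (pvFoldG pvEmitA pvUpdA rest ([], [])).1,
            (pvFoldG pvEmitA pvUpdA rest ([], [])).2)
            = [PySem.Chars.join ['\n'] cur] ++ pvFinA (pvFoldG pvEmitA pvUpdA rest ([], [])) := by
          simp only [pvFinA]
          split_ifs <;> simp
        have hBfst : pvFinB ([PySem.Chars.join [' '] (cur.map PySem.Chars.strip)] ++ (pvFoldG pvEmitB pvUpdB rest ([], [])).1,
            (pvFoldG pvEmitB pvUpdB rest ([], [])).2)
            = [PySem.Chars.join [' '] (cur.map PySem.Chars.strip)] ++ pvFinB (pvFoldG pvEmitB pvUpdB rest ([], [])) := by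
          simp only [pvFinB]
          split_ifs <;> simp
        rw [hAfst, hBfst]
        have hcore := ih hnl' [] (by simp)
        simp only [List.map_nil] at hcore
        simp only [pvSecond, List.flatMap_append, List.flatMap_cons, List.flatMap_nil,
          List.append_nil] at hcore ⊢
        rw [if_pos hnn, heq, hcore]
    · by_cases hkeep : PySem.Chars.strip l ≠ [] ∧ PySem.Chars.startswith (PySem.Chars.strip l) ['#'] = false
      · have eA : pvEmitA cur l = [] := by simp [pvEmitA, hsep]
        have uA : pvUpdA cur l = cur ++ [l] := by simp [pvUpdA, hsep, hkeep]
        have eB : pvEmitB (cur.map PySem.Chars.strip) l = [] := by simp [pvEmitB, hsep]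
        have uB : pvUpdB (cur.map PySem.Chars.strip) l = cur.map PySem.Chars.strip ++ [PySem.Chars.strip l] := by
          simp [pvUpdB, hsep, hkeep]
        rw [eA, uA, eB, uB]
        simp only [List.nil_append]
        have hmm : (cur ++ [l]).map PySem.Chars.strip = cur.map PySem.Chars.strip ++ [PySem.Chars.strip l] := by
          simp [PySem.Chars.strip]
        rw [← hmm]
        refine ih hnl' (cur ++ [l]) ?_
        intro x hx
        rcases List.mem_append.mp hx with h | h
        · exact hc x h
        · simp at h
          rw [h]
          exact ⟨hnl l (by simp), hkeep.1⟩
      · have eA : pvEmitA cur l = [] := by simp [pvEmitA, hsep]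
        have uA : pvUpdA cur l = cur := by simp [pvUpdA, hsep, hkeep]
        have eB : pvEmitB (cur.map PySem.Chars.strip) l = [] := by simp [pvEmitB, hsep]
        have uB : pvUpdB (cur.map PySem.Chars.strip) l = cur.map PySem.Chars.strip := by simp [pvUpdB, hsep, hkeep]
        rw [eA, uA, eB, uB]
        simp only [List.nil_append]
        exact ih hnl' cur hc

-- ===== bridging the B-style fold to B's segment recursion =====

-- the B-style fold is insensitive to pre-stripping the lines (strip is idempotent)
theorem pv_foldB_map_strip :
    ∀ (lines : List (List Char)) (st : List (List Char) × List (List Char)),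
    pvFoldG pvEmitB pvUpdB (lines.map PySem.Chars.strip) st = pvFoldG pvEmitB pvUpdB lines st := by
  intro lines
  induction lines with
  | nil => intro st; rfl
  | cons l rest ih =>
    intro st
    show pvFoldG pvEmitB pvUpdB (rest.map PySem.Chars.strip)
        (st.1 ++ pvEmitB st.2 (PySem.Chars.strip l), pvUpdB st.2 (PySem.Chars.strip l))
      = pvFoldG pvEmitB pvUpdB rest (st.1 ++ pvEmitB st.2 l, pvUpdB st.2 l)
    rw [show pvEmitB st.2 (PySem.Chars.strip l) = pvEmitB st.2 l by unfold pvEmitB; rw [pv_strip_idem],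
      show pvUpdB st.2 (PySem.Chars.strip l) = pvUpdB st.2 l by unfold pvUpdB; rw [pv_strip_idem],
      ih]

theorem pv_finB_append (xs : List (List Char)) (p : List (List Char) × List (List Char)) :
    pvFinB (xs ++ p.1, p.2) = xs ++ pvFinB p := by
  simp only [pvFinB]
  split_ifs <;> simp

-- one unfolding step of pvAltLoop, valid for [] too
theorem pv_altLoop_unfold (ls : List (List Char)) :
    pvAltLoop ls
      = (if (ls.takeWhile (fun t => !(t == ['-', '-', '-']))).filter
            (fun t => !(t == ([] : List Char)) && !(PySem.Chars.startswith t ['#'])) ≠ []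
         then [PySem.Chars.join [' ']
            ((ls.takeWhile (fun t => !(t == ['-', '-', '-']))).filter
              (fun t => !(t == ([] : List Char)) && !(PySem.Chars.startswith t ['#'])))]
         else [])
        ++ pvAltLoop (ls.dropWhile (fun t => !(t == ['-', '-', '-']))).tail := by
  cases ls with
  | nil => simp [pvAltLoop]
  | cons s r => rw [pvAltLoop]

-- the B-style fold over pre-stripped lines equals B's segment recursion
theorem pv_fold_to_segments :
    ∀ (ls : List (List Char)), (∀ s ∈ ls, PySem.Chars.strip s = s) →
    ∀ (cur : List (List Char)),
    pvFinB (pvFoldG pvEmitB pvUpdB ls ([], cur))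
      = (if cur ++ (ls.takeWhile (fun t => !(t == ['-', '-', '-']))).filter
            (fun t => !(t == ([] : List Char)) && !(PySem.Chars.startswith t ['#'])) ≠ []
         then [PySem.Chars.join [' ']
            (cur ++ (ls.takeWhile (fun t => !(t == ['-', '-', '-']))).filter
              (fun t => !(t == ([] : List Char)) && !(PySem.Chars.startswith t ['#'])))]
         else [])
        ++ pvAltLoop (ls.dropWhile (fun t => !(t == ['-', '-', '-']))).tail := by
  intro ls
  induction ls with
  | nil =>
    intro _ cur
    show pvFinB ([], cur) = _
    simp [pvFinB, pvAltLoop]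
  | cons s r ih =>
    intro hstr cur
    have hs : PySem.Chars.strip s = s := hstr s (by simp)
    have hstr' : ∀ x ∈ r, PySem.Chars.strip x = x := fun x hx => hstr x (List.mem_cons_of_mem _ hx)
    show pvFinB (pvFoldG pvEmitB pvUpdB r ([] ++ pvEmitB cur s, pvUpdB cur s)) = _
    by_cases hsep : s = ['-', '-', '-']
    · have hsepB : (s == ['-', '-', '-']) = true := by simp [hsep]
      have eB : pvEmitB cur s = (if cur ≠ [] then [PySem.Chars.join [' '] cur] else []) := by
        unfold pvEmitB; rw [hs, if_pos hsep]
      have uB : pvUpdB cur s = [] := by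
        unfold pvUpdB
        rw [hs, if_pos hsep]
        split_ifs with h
        · rfl
        · exact not_not.mp h
      rw [eB, uB, List.nil_append,
        pvFoldG_acc pvEmitB pvUpdB r (if cur ≠ [] then [PySem.Chars.join [' '] cur] else []) [],
        pv_finB_append]
      have hIH := ih hstr' []
      simp only [List.nil_append] at hIH
      rw [hIH, ← pv_altLoop_unfold r]
      rw [List.takeWhile_cons, List.dropWhile_cons]
      simp only [hsepB, Bool.not_true, Bool.false_eq_true, if_false, List.filter_nil,
        List.append_nil, List.tail_cons]
    · have hsepB : (s == ['-', '-', '-']) = false := by simp [hsep]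
      rw [List.takeWhile_cons, List.dropWhile_cons]
      simp only [hsepB, Bool.not_false, if_true, List.filter_cons]
      by_cases hkeep : PySem.Chars.strip s ≠ [] ∧ PySem.Chars.startswith (PySem.Chars.strip s) ['#'] = false
      · have hkB : (!(s == ([] : List Char)) && !(PySem.Chars.startswith s ['#'])) = true := by
          rw [hs] at hkeep
          simp [hkeep.1, hkeep.2]
        have eB : pvEmitB cur s = [] := by simp [pvEmitB, hs, hsep]
        have uB : pvUpdB cur s = cur ++ [PySem.Chars.strip s] := by
          unfold pvUpdB
          rw [if_neg (by rw [hs]; exact hsep), if_pos hkeep]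
        rw [eB, uB, List.nil_append, ih hstr' (cur ++ [PySem.Chars.strip s]), hs]
        simp only [hkB, if_true, List.append_assoc, List.singleton_append]
      · have hkB : (!(s == ([] : List Char)) && !(PySem.Chars.startswith s ['#'])) = false := by
          rw [hs] at hkeep
          rcases not_and_or.mp hkeep with h | h
          · simp [not_not.mp h]
          · have h' : PySem.Chars.startswith s ['#'] = true := by
              cases hx : PySem.Chars.startswith s ['#'] with
              | false => exact absurd hx h
              | true => rfl
            simp [h']
        have eB : pvEmitB cur s = [] := by simp [pvEmitB, hs, hsep]
        have uB : pvUpdB cur s = cur := by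
          unfold pvUpdB
          rw [if_neg (by rw [hs]; exact hsep), if_neg hkeep]
        rw [eB, uB, List.nil_append, ih hstr' cur]
        simp only [hkB, Bool.false_eq_true, if_false]

-- ===== VERDICT (by name: the statement is the Claim_ definition above) =====
theorem parse_lines_block_py_spec : Claim_equal_parse_lines_block_py := by
  intro content _
  unfold Spec_parse_lines_block_py
  have hnl : ∀ l ∈ PySem.Chars.splitOn content.toList ['\n'], '\n' ∉ l := by
    intro l hl
    rw [pv_splitOn_single] at hl
    exact pv_not_mem_splitOn _ _ _ hl
  simp only [parse_lines_block_py, parse_lines_block_py_alt, pvSplitItems]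
  rw [pv_foldA_eq, pv_second_pass]
  have hcore := pv_core (PySem.Chars.splitOn content.toList ['\n']) hnl [] (by simp)
  simp only [List.map_nil] at hcore
  simp only [pvFinA, pvFinB] at hcore
  rw [List.nil_append, hcore]
  rw [show (if (pvFoldG pvEmitB pvUpdB (PySem.Chars.splitOn content.toList ['\n']) ([], [])).2 ≠ []
      then (pvFoldG pvEmitB pvUpdB (PySem.Chars.splitOn content.toList ['\n']) ([], [])).1
        ++ [PySem.Chars.join [' '] (pvFoldG pvEmitB pvUpdB (PySem.Chars.splitOn content.toList ['\n']) ([], [])).2]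
      else (pvFoldG pvEmitB pvUpdB (PySem.Chars.splitOn content.toList ['\n']) ([], [])).1)
      = pvFinB (pvFoldG pvEmitB pvUpdB (PySem.Chars.splitOn content.toList ['\n']) ([], [])) from rfl]
  rw [← pv_foldB_map_strip]
  rw [pv_fold_to_segments ((PySem.Chars.splitOn content.toList ['\n']).map PySem.Chars.strip)
    (by intro s hs; simp only [List.mem_map] at hs; obtain ⟨x, _, rfl⟩ := hs; exact pv_strip_idem x) []]
  rw [List.nil_append, ← pv_altLoop_unfold]
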